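-- pv_equiv track=rewrite | github.com/DaveChains/Data-Structures-Algorithms | src/python/publisher/neetcode/neet_code_all/arrays_and_hashing/UniqueEmailAddresses.py | neetProcessLocalEmailPlusSign
-- ===== SOURCE A (Python) =====
-- def neetProcessLocalEmailPlusSign(emails: str) -> str:
--     uniqueSet = set()
--
--     for email in emails:
--         i = 0
--         local = ""
--         while email[i] not in ["@", "+"]:
--             if email[i] != ".":
--                 local = local + email[i]
--             i += 1
--
--         domain = ""
--         j = len(email) - 1
--         while email[j] != "@":
--             domain = email[j] + domain
--             j -= 1
--
--         uniqueSet.add((local, domain))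
--
--     return len(uniqueSet)
-- ===== SOURCE B (Python) =====
-- def neetProcessLocalEmailPlusSign(emails):
--     unique = {
--         (email[:email.index('@')].split('+')[0].replace('.', ''),
--          email[email.rindex('@') + 1:])
--         for email in emails
--     }
--     return len(unique)
-- ===== Notes on version B (the rewrite author's own statement) =====
-- stated objective: idiomatic
-- what changed: Replaced the hand-written character/index while-loops with string slicing via index/rindex plus split/replace, and the explicit set-building loop with a set comprehension.
import Mathlib
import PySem

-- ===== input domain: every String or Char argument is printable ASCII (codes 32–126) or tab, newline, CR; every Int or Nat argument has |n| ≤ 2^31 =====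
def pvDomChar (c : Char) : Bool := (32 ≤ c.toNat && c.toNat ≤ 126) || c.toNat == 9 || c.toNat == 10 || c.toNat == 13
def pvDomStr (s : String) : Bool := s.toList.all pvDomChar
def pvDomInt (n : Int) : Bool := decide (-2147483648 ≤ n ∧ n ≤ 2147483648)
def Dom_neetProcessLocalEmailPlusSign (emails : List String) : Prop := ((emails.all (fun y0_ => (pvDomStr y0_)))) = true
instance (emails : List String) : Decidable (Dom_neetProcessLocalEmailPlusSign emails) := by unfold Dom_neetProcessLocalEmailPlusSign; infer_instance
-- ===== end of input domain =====

-- B replaces A's hand-written character/index while-loops with string slicing via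
-- index/rindex plus split/replace and a set comprehension (idiomatic, same cost).


-- ===== PORT A =====
-- A's first while loop: scan forward until '@' or '+', appending every non-'.' char.
-- (Indexing i=0,1,… over email is transcribed as consuming the char list; under
-- Pre_ the Python loop always stops in range, where this is exact.)
def pvLoopLocalA : List Char → List Char → List Char
  | [], acc => acc
  | c :: rest, acc =>
    if c = '@' ∨ c = '+' then acc
    else pvLoopLocalA rest (if c ≠ '.' then acc ++ [c] else acc)

-- A's second while loop: scan backward from the end until '@', prepending each char.
-- (Indexing j=len-1,len-2,… is transcribed as consuming the reversed char list;
-- under Pre_ the Python loop stops before j goes negative, where this is exact.)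
def pvLoopDomainA : List Char → List Char → List Char
  | [], acc => acc
  | c :: rest, acc => if c = '@' then acc else pvLoopDomainA rest (c :: acc)

def neetProcessLocalEmailPlusSign (emails : List String) : Int :=
  let uniqueSet := emails.foldl (fun st email =>
    let cs := email.toList
    let localPart := pvLoopLocalA cs []
    let domain := pvLoopDomainA cs.reverse []
    PySem.Set.add st (String.ofList localPart, String.ofList domain)) PySem.Set.empty
  (PySem.Set.len uniqueSet : Int)

-- ===== PORT B =====
-- (email[:email.index('@')].split('+')[0].replace('.',''), email[email.rindex('@')+1:])
-- index/rindex raise ValueError when '@' is absent (outside Pre_, where nothing is claimed).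
def pvPairB (email : String) : String × String :=
  let cs := email.toList
  let i := cs.idxOf '@'                                       -- email.index('@')
  let localPart := ((cs.take i).takeWhile (· ≠ '+')).filter (· ≠ '.')
                                                              -- [:i].split('+')[0].replace('.','')
  let j := cs.length - 1 - cs.reverse.idxOf '@'               -- email.rindex('@')
  let domain := cs.drop (j + 1)                               -- email[j+1:]
  (String.ofList localPart, String.ofList domain)

def neetProcessLocalEmailPlusSign_alt (emails : List String) : Int :=
  (PySem.Set.len (emails.foldl (fun st e => PySem.Set.add st (pvPairB e)) PySem.Set.empty) : Int)

-- ===== PRECONDITION & SPEC =====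
-- Pre_ excludes exactly the inputs where Python A raises IndexError: any email lacking
-- '@' (including the empty string) makes one of A's index loops run out of the string.
def Pre_neetProcessLocalEmailPlusSign (emails : List String) : Prop :=
  ∀ e ∈ emails, '@' ∈ e.toList
instance (emails : List String) : Decidable (Pre_neetProcessLocalEmailPlusSign emails) := by unfold Pre_neetProcessLocalEmailPlusSign; infer_instance

def pvWitness_neetProcessLocalEmailPlusSign : List String := ["a.b+c@x.com", "ab@x.com", "z@y"]

def Spec_neetProcessLocalEmailPlusSign (emails : List String) (out : Int) : Prop := out = neetProcessLocalEmailPlusSign_alt emails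
instance (emails : List String) (out : Int) : Decidable (Spec_neetProcessLocalEmailPlusSign emails out) := by unfold Spec_neetProcessLocalEmailPlusSign; infer_instance

-- ===== CLAIM (what is proved, stated in full; the proofs are below) =====
def Claim_equal_neetProcessLocalEmailPlusSign : Prop := ∀ (emails : List String), Dom_neetProcessLocalEmailPlusSign emails → Pre_neetProcessLocalEmailPlusSign emails → Spec_neetProcessLocalEmailPlusSign emails (neetProcessLocalEmailPlusSign emails)

-- ===== LEMMAS AND PROOFS =====

theorem pvLoopLocalA_eq (cs acc : List Char) :
    pvLoopLocalA cs acc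
      = acc ++ (cs.takeWhile (fun c => ¬(c = '@' ∨ c = '+'))).filter (· ≠ '.') := by
  induction cs generalizing acc with
  | nil => simp [pvLoopLocalA]
  | cons c rest ih =>
    by_cases h : c = '@' ∨ c = '+'
    · simp [pvLoopLocalA, h, List.takeWhile]
    · by_cases hd : c = '.'
      · simp [pvLoopLocalA, h, hd, ih, List.takeWhile]
      · simp [pvLoopLocalA, h, hd, ih, List.takeWhile]

theorem pvLoopDomainA_eq (cs acc : List Char) :
    pvLoopDomainA cs acc = (cs.takeWhile (· ≠ '@')).reverse ++ acc := by
  induction cs generalizing acc with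
  | nil => simp [pvLoopDomainA]
  | cons c rest ih =>
    by_cases h : c = '@'
    · simp [pvLoopDomainA, h, List.takeWhile]
    · simp [pvLoopDomainA, h, ih, List.takeWhile]

theorem takeWhile_takeWhile_conj (cs : List Char) :
    (cs.takeWhile (· ≠ '@')).takeWhile (· ≠ '+')
      = cs.takeWhile (fun c => ¬(c = '@' ∨ c = '+')) := by
  induction cs with
  | nil => rfl
  | cons c rest ih =>
    by_cases h1 : c = '@'
    · simp [List.takeWhile, h1]
    · by_cases h2 : c = '+'
      · simp [List.takeWhile, h1, h2]
      · simp [List.takeWhile_cons, h1, h2]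
        simpa using ih

theorem take_idxOf_eq_takeWhile (c : Char) (l : List Char) (h : c ∈ l) :
    l.take (l.idxOf c) = l.takeWhile (· ≠ c) := by
  induction l with
  | nil => cases h
  | cons a rest ih =>
    by_cases ha : a = c
    · simp [ha, List.idxOf_cons, List.takeWhile]
    · have hc : c ∈ rest := by
        rcases List.mem_cons.mp h with h' | h'
        · exact absurd h'.symm ha
        · exact h'
      simp [List.idxOf_cons, ha, List.takeWhile, ih hc]

theorem pair_eq (email : String) (h : '@' ∈ email.toList) :
    (String.ofList (pvLoopLocalA email.toList []),
     String.ofList (pvLoopDomainA email.toList.reverse [])) = pvPairB email := by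
  unfold pvPairB
  refine Prod.ext ?_ ?_ <;> dsimp only
  · rw [pvLoopLocalA_eq, take_idxOf_eq_takeWhile '@' email.toList h,
      takeWhile_takeWhile_conj]
    simp
  · have hr : email.toList.reverse.idxOf '@' < email.toList.length := by
      have := List.idxOf_lt_length_of_mem (List.mem_reverse.mpr h)
      simpa using this
    have hj : email.toList.length - 1 - email.toList.reverse.idxOf '@' + 1
        = email.toList.length - email.toList.reverse.idxOf '@' := by omega
    rw [pvLoopDomainA_eq,
      ← take_idxOf_eq_takeWhile '@' email.toList.reverse (List.mem_reverse.mpr h),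
      List.take_reverse, hj]
    simp

theorem fold_eq (emails : List String) (st : PySem.Set (String × String))
    (h : ∀ e ∈ emails, '@' ∈ e.toList) :
    emails.foldl (fun st email =>
        let cs := email.toList
        let localPart := pvLoopLocalA cs []
        let domain := pvLoopDomainA cs.reverse []
        PySem.Set.add st (String.ofList localPart, String.ofList domain)) st
      = emails.foldl (fun st e => PySem.Set.add st (pvPairB e)) st := by
  induction emails generalizing st with
  | nil => rfl
  | cons e rest ih =>
    simp only [List.foldl_cons]
    rw [pair_eq e (h e List.mem_cons_self)]
    exact ih _ (fun x hx => h x (List.mem_cons_of_mem e hx))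

-- ===== VERDICT (by name: the statement is the Claim_ definition above) =====
theorem neetProcessLocalEmailPlusSign_spec : Claim_equal_neetProcessLocalEmailPlusSign := by
  intro emails _ hpre
  unfold Spec_neetProcessLocalEmailPlusSign neetProcessLocalEmailPlusSign neetProcessLocalEmailPlusSign_alt
  rw [fold_eq emails PySem.Set.empty hpre]
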